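-- pv_equiv track=rewrite | github.com/smearle/script-doctor | env.py | gen_perp_par_subrules
-- ===== SOURCE A (Python) =====
-- def gen_perp_par_subrules(l_kerns, r_kerns):
--     new_patterns = [[None, None], [None, None]]
--     for i, p in enumerate((l_kerns, r_kerns)):
--         new_kerns_a = []
--         new_kerns_b = []
--         for k in p:
--             l_kern_a = []
--             l_kern_b = []
--             for c in k:
--                 c_a = []
--                 c_b = []
--                 for object_with_modifier in c:
--                     modifier = object_with_modifier.split(' ')[0].lower()
--                     if modifier.lower() in ['perpendicular', 'orthogonal']:
--                         c_a.append('^')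
--                         c_b.append('v')
--                     elif modifier.lower() in ['parallel']:
--                         c_a.append('>')
--                         c_b.append('<')
--                     else:
--                         c_a.append(object_with_modifier)
--                         c_b.append(object_with_modifier)
--                 l_kern_a.append(c_a)
--                 l_kern_b.append(c_b)
--             new_kerns_a.append(l_kern_a)
--             new_kerns_b.append(l_kern_b)
--         new_patterns[0][i] = (new_kerns_a)
--         new_patterns[1][i] = (new_kerns_b)
--     return new_patterns
-- ===== SOURCE B (Python) =====
-- def gen_perp_par_subrules(l_kerns, r_kerns):
--     def transform(x):
--         if isinstance(x, str):
--             m = x.split(' ')[0].lower()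
--             if m in ('perpendicular', 'orthogonal'):
--                 return ('^', 'v')
--             if m == 'parallel':
--                 return ('>', '<')
--             return (x, x)
--         pairs = [transform(child) for child in x]
--         return ([a for a, _ in pairs], [b for _, b in pairs])
--     a_l, b_l = transform(l_kerns)
--     a_r, b_r = transform(r_kerns)
--     return [[a_l, a_r], [b_l, b_r]]
-- ===== Notes on version B (the rewrite author's own statement) =====
-- stated objective: simpler
-- what changed: Replaces the fixed four-deep loop nest that appends to six parallel accumulators with a single recursive transform returning an (a-variant, b-variant) pair per node, unzipped at each list level.
import Mathlib
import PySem

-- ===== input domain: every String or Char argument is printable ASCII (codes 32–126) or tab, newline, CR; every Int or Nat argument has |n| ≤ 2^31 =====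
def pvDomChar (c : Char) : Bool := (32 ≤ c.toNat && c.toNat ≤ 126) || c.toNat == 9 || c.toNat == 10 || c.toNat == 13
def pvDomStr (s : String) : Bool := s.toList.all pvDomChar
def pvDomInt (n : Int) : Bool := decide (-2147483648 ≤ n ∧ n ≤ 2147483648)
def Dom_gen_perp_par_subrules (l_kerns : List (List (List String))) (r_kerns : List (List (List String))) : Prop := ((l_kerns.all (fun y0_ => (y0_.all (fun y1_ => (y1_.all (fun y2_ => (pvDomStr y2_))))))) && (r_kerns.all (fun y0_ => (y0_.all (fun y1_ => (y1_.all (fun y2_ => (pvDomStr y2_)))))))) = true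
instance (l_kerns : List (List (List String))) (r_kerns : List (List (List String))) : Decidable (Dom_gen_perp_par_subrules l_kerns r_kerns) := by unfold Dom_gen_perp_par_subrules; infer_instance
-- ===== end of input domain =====

-- B replaces A's fixed four-deep loop nest with six append-accumulators by a recursive
-- per-level transform returning an (a-variant, b-variant) pair, unzipped at each level.


-- ===== PORT A =====
-- innermost loop 'for object_with_modifier in c', appending to c_a / c_b;
-- object_with_modifier.split(' ')[0]: split? with a nonempty sep is always 'some' and
-- nonempty, so '.getD [""] … .headD ""' is exact
def pvA_c (c : List String) : List String × List String :=
  c.foldl (fun acc owm =>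
    let modifier := PySem.Str.lower (((PySem.Str.split? owm " ").getD [""]).headD "")
    if PySem.Str.lower modifier = "perpendicular" ∨ PySem.Str.lower modifier = "orthogonal" then
      (acc.1 ++ ["^"], acc.2 ++ ["v"])
    else if PySem.Str.lower modifier = "parallel" then
      (acc.1 ++ [">"], acc.2 ++ ["<"])
    else
      (acc.1 ++ [owm], acc.2 ++ [owm])) ([], [])

-- 'for c in k', appending to l_kern_a / l_kern_b
def pvA_k (k : List (List String)) : List (List String) × List (List String) :=
  k.foldl (fun acc c => (acc.1 ++ [(pvA_c c).1], acc.2 ++ [(pvA_c c).2])) ([], [])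

-- 'for k in p', appending to new_kerns_a / new_kerns_b
def pvA_p (p : List (List (List String))) : List (List (List String)) × List (List (List String)) :=
  p.foldl (fun acc k => (acc.1 ++ [(pvA_k k).1], acc.2 ++ [(pvA_k k).2])) ([], [])

-- the enumerate loop fills new_patterns[0][i] / new_patterns[1][i] for i = 0 (l_kerns), 1 (r_kerns)
def gen_perp_par_subrules (l_kerns : List (List (List String))) (r_kerns : List (List (List String))) : List (List (List (List (List String)))) :=
  let la := pvA_p l_kerns
  let ra := pvA_p r_kerns
  [[la.1, ra.1], [la.2, ra.2]]

-- ===== PORT B =====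
def pvB_sym (s : String) : String × String :=
  let m := PySem.Str.lower (((PySem.Str.split? s " ").getD [""]).headD "")
  if m = "perpendicular" ∨ m = "orthogonal" then ("^", "v")
  else if m = "parallel" then (">", "<")
  else (s, s)

def pvB_c (c : List String) : List String × List String :=
  (c.map pvB_sym).unzip

def pvB_k (k : List (List String)) : List (List String) × List (List String) :=
  (k.map pvB_c).unzip

def pvB_p (p : List (List (List String))) : List (List (List String)) × List (List (List String)) :=
  (p.map pvB_k).unzip

def gen_perp_par_subrules_alt (l_kerns : List (List (List String))) (r_kerns : List (List (List String))) : List (List (List (List (List String)))) :=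
  let l := pvB_p l_kerns
  let r := pvB_p r_kerns
  [[l.1, r.1], [l.2, r.2]]

-- ===== PRECONDITION & SPEC =====
def Spec_gen_perp_par_subrules (l_kerns : List (List (List String))) (r_kerns : List (List (List String))) (out : List (List (List (List (List String))))) : Prop := out = gen_perp_par_subrules_alt l_kerns r_kerns
instance (l_kerns : List (List (List String))) (r_kerns : List (List (List String))) (out : List (List (List (List (List String))))) : Decidable (Spec_gen_perp_par_subrules l_kerns r_kerns out) := by unfold Spec_gen_perp_par_subrules; infer_instance

-- ===== CLAIM (what is proved, stated in full; the proofs are below) =====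
def Claim_equal_gen_perp_par_subrules : Prop := ∀ (l_kerns : List (List (List String))) (r_kerns : List (List (List String))), Dom_gen_perp_par_subrules l_kerns r_kerns → Spec_gen_perp_par_subrules l_kerns r_kerns (gen_perp_par_subrules l_kerns r_kerns)

-- ===== LEMMAS AND PROOFS =====
theorem lowerChar_idem (c : Char) : PySem.Chars.lowerChar (PySem.Chars.lowerChar c) = PySem.Chars.lowerChar c := by
  simp only [PySem.Chars.lowerChar, PySem.Chars.isupper]
  split_ifs with h1 h2 <;> simp_all
  exfalso
  obtain ⟨ha, hb⟩ := h1
  simp [Char.le_def, UInt32.le_iff_toNat_le] at ha hb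
  have hv : (Char.ofNat (c.toNat + 32)).toNat = c.toNat + 32 := by
    rw [Char.toNat_ofNat]
    have : Nat.isValidChar (c.toNat + 32) := Or.inl (by omega)
    simp [this]
  have h2' := h2.2
  simp [Char.le_def, UInt32.le_iff_toNat_le, hv] at h2'
  omega

theorem lower_idem (s : String) : PySem.Str.lower (PySem.Str.lower s) = PySem.Str.lower s := by
  have h : (PySem.Str.lower (PySem.Str.lower s)).toList = (PySem.Str.lower s).toList := by
    simp [PySem.Str.toList_lower, PySem.Chars.lower, List.map_map, Function.comp, lowerChar_idem]
  exact String.toList_inj.mp h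

-- the common shape of A's three loops: append both components of (g z) to a pair of accumulators
theorem foldl_pair_acc {α β : Type} (g : α → β × β) (l : List α) (a b : List β) :
    l.foldl (fun acc z => (acc.1 ++ [(g z).1], acc.2 ++ [(g z).2])) (a, b)
      = (a ++ (l.map g).unzip.1, b ++ (l.map g).unzip.2) := by
  induction l generalizing a b with
  | nil => simp
  | cons x xs ih => simp [ih]

theorem pvA_c_eq (c : List String) : pvA_c c = pvB_c c := by
  unfold pvA_c pvB_c
  have hf : (fun (acc : List String × List String) owm =>
      let modifier := PySem.Str.lower (((PySem.Str.split? owm " ").getD [""]).headD "")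
      if PySem.Str.lower modifier = "perpendicular" ∨ PySem.Str.lower modifier = "orthogonal" then
        (acc.1 ++ ["^"], acc.2 ++ ["v"])
      else if PySem.Str.lower modifier = "parallel" then
        (acc.1 ++ [">"], acc.2 ++ ["<"])
      else
        (acc.1 ++ [owm], acc.2 ++ [owm]))
      = (fun acc z => (acc.1 ++ [(pvB_sym z).1], acc.2 ++ [(pvB_sym z).2])) := by
    funext acc owm
    simp only [pvB_sym, lower_idem]
    split_ifs <;> rfl
  rw [hf, foldl_pair_acc]
  simp [List.unzip_eq_map, Function.comp_def]

theorem pvA_k_eq (k : List (List String)) : pvA_k k = pvB_k k := by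
  unfold pvA_k pvB_k
  rw [show (fun (acc : List (List String) × List (List String)) c =>
        (acc.1 ++ [(pvA_c c).1], acc.2 ++ [(pvA_c c).2]))
      = (fun acc c => (acc.1 ++ [(pvB_c c).1], acc.2 ++ [(pvB_c c).2])) by
    funext acc c; rw [pvA_c_eq]]
  rw [foldl_pair_acc]
  simp [List.unzip_eq_map, Function.comp_def]

theorem pvA_p_eq (p : List (List (List String))) : pvA_p p = pvB_p p := by
  unfold pvA_p pvB_p
  rw [show (fun (acc : List (List (List String)) × List (List (List String))) k =>
        (acc.1 ++ [(pvA_k k).1], acc.2 ++ [(pvA_k k).2]))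
      = (fun acc k => (acc.1 ++ [(pvB_k k).1], acc.2 ++ [(pvB_k k).2])) by
    funext acc k; rw [pvA_k_eq]]
  rw [foldl_pair_acc]
  simp [List.unzip_eq_map, Function.comp_def]

-- ===== VERDICT (by name: the statement is the Claim_ definition above) =====
theorem gen_perp_par_subrules_spec : Claim_equal_gen_perp_par_subrules := by
  intro l r _
  unfold Spec_gen_perp_par_subrules gen_perp_par_subrules gen_perp_par_subrules_alt
  simp [pvA_p_eq]
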